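-- pv_equiv track=rewrite | github.com/matheuscas/fuzzy_opinion_mining | op_export.py | get_adjectives
-- ===== SOURCE A (Python) =====
-- def get_adjectives(ndoc, filtered=True):
-- 	"""This method return from document all the adjectives based on the following parameters:
--
-- 	Keyword arguments:
-- 	ndoc -- document from model
-- 	filtered -- Returns only adjectives that are not in ADV / ADJ bigrams (default: True)
-- 	"""
--
-- 	adjectives = ndoc['adjectives']
-- 	adjs_adv_adj_bigram = ndoc['adjs_adv_adj_bigram']
--
-- 	if filtered:
-- 		for e in adjs_adv_adj_bigram:
-- 			if e in adjectives:
-- 				adjectives.remove(e)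
--
-- 	return adjectives
-- ===== SOURCE B (Python) =====
-- def get_adjectives(ndoc, filtered=True):
--     """Single-pass filter: count removal budget once, then walk adjectives once.
--
--     Mutates ndoc['adjectives'] in place (via slice assignment) like A does
--     (A mutates via list.remove); returns the same list object.
--     """
--     adjectives = ndoc['adjectives']
--     bigram = ndoc['adjs_adv_adj_bigram']
--     if filtered:
--         budget = {}
--         for e in bigram:
--             budget[e] = budget.get(e, 0) + 1
--         result = []
--         for x in adjectives:
--             c = budget.get(x, 0)
--             if c > 0:
--                 budget[x] = c - 1
--             else:
--                 result.append(x)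
--         adjectives[:] = result
--     return adjectives
-- ===== Notes on version B (the rewrite author's own statement) =====
-- stated objective: faster
-- what changed: Instead of calling list.remove (a linear scan) once per bigram element, B builds a dict of removal counts in one pass over the bigram list and then filters the adjectives list in a single pass, skipping the first budgeted occurrences; mutation of ndoc['adjectives'] in place is preserved via slice assignment.
-- outside the precondition, e.g. on get_adjectives({}, True): A raises KeyError, B raises KeyError
import Mathlib
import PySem

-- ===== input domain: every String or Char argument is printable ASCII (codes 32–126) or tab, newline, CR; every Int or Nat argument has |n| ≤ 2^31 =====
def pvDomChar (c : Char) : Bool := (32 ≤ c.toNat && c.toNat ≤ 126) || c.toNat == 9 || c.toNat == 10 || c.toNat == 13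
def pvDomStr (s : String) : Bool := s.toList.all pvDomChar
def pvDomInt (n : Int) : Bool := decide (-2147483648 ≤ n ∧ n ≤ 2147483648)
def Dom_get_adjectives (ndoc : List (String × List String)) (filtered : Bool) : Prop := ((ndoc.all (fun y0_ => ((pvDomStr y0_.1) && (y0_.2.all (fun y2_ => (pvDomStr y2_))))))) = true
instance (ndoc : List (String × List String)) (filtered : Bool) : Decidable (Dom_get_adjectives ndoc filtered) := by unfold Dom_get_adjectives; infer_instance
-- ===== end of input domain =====

-- B changes the algorithm: one counting pass + one filtering pass instead of a
-- linear list.remove scan per bigram element (faster). Both A and B mutate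
-- ndoc['adjectives'] in place and return that same list object; the theorems
-- here are about the returned value.

-- ===== PORT A =====
-- adjectives.remove(e) guarded by 'e in adjectives', as in A's loop body
def pvRemA (adjs : List String) (e : String) : List String :=
  if adjs.contains e then (PySem.List.remove? adjs e).getD adjs else adjs

def get_adjectives (ndoc : List (String × List String)) (filtered : Bool) : List String :=
  let adjectives := (ndoc.lookup "adjectives").getD []
  let bigram := (ndoc.lookup "adjs_adv_adj_bigram").getD []
  if filtered then bigram.foldl pvRemA adjectives else adjectives

-- ===== PORT B =====
-- the second loop of Source B: walk adjectives once, spending the budget dict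
def pvAltGo (budget : PySem.Dict String Int) : List String → List String
  | [] => []
  | x :: xs =>
      let c := budget.getD x 0
      if c > 0 then pvAltGo (budget.insert x (c - 1)) xs
      else x :: pvAltGo budget xs

def get_adjectives_alt (ndoc : List (String × List String)) (filtered : Bool) : List String :=
  let adjectives := (ndoc.lookup "adjectives").getD []
  let bigram := (ndoc.lookup "adjs_adv_adj_bigram").getD []
  if filtered then
    let budget := bigram.foldl (fun d e => d.insert e (d.getD e 0 + 1)) PySem.Dict.empty
    pvAltGo budget adjectives
  else adjectives

-- ===== PRECONDITION & SPEC =====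
-- A raises KeyError unless both keys 'adjectives' and 'adjs_adv_adj_bigram' are present.
def Pre_get_adjectives (ndoc : List (String × List String)) (filtered : Bool) : Prop :=
  (ndoc.lookup "adjectives").isSome = true ∧ (ndoc.lookup "adjs_adv_adj_bigram").isSome = true
instance (ndoc : List (String × List String)) (filtered : Bool) : Decidable (Pre_get_adjectives ndoc filtered) := by unfold Pre_get_adjectives; infer_instance

def pvWitness_get_adjectives : (List (String × List String)) × Bool :=
  ([("adjectives", ["nice", "big", "nice"]), ("adjs_adv_adj_bigram", ["nice", "tall"])], true)

def Spec_get_adjectives (ndoc : List (String × List String)) (filtered : Bool) (out : List String) : Prop := out = get_adjectives_alt ndoc filtered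
instance (ndoc : List (String × List String)) (filtered : Bool) (out : List String) : Decidable (Spec_get_adjectives ndoc filtered out) := by unfold Spec_get_adjectives; infer_instance

-- ===== CLAIM (what is proved, stated in full; the proofs are below) =====
def Claim_equal_get_adjectives : Prop := ∀ (ndoc : List (String × List String)) (filtered : Bool), Dom_get_adjectives ndoc filtered → Pre_get_adjectives ndoc filtered → Spec_get_adjectives ndoc filtered (get_adjectives ndoc filtered)

-- ===== LEMMAS AND PROOFS =====

-- functional mirror of pvAltGo: budget as a plain function
def pvAltF (f : String → Int) : List String → List String
  | [] => []
  | x :: xs => if f x > 0 then pvAltF (Function.update f x (f x - 1)) xs else x :: pvAltF f xs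

theorem pvAltGo_eq_altF (xs : List String) : ∀ (d : PySem.Dict String Int),
    pvAltGo d xs = pvAltF (fun y => d.getD y 0) xs := by
  induction xs with
  | nil => intro d; rfl
  | cons x xs ih =>
    intro d
    simp only [pvAltGo, pvAltF]
    by_cases h : d.getD x 0 > 0
    · simp only [h, if_pos]
      rw [ih]
      congr 1
      funext y
      by_cases hy : y = x
      · subst hy; simp [Function.update]
      · simp [PySem.Dict.getD_insert, hy, Function.update]
    · simp only [h, if_false]
      rw [ih]

theorem pvAltF_of_nonpos (xs : List String) (f : String → Int) (h : ∀ y, f y ≤ 0) :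
    pvAltF f xs = xs := by
  induction xs with
  | nil => rfl
  | cons x xs ih => simp only [pvAltF]; rw [if_neg (by simpa using h x), ih]

theorem pvRemA_eq_erase (adjs : List String) (e : String) : pvRemA adjs e = adjs.erase e := by
  unfold pvRemA
  by_cases h : e ∈ adjs
  · rw [if_pos (by simpa using h), PySem.List.remove?_eq_some_erase adjs e h, Option.getD_some]
  · rw [if_neg (by simpa using h), List.erase_of_not_mem h]

-- bumping the budget at e = erasing the first occurrence of e first
theorem pvAltF_update_add_one (xs : List String) : ∀ (f : String → Int) (e : String),
    (∀ y, 0 ≤ f y) →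
    pvAltF (Function.update f e (f e + 1)) xs = pvAltF f (xs.erase e) := by
  induction xs with
  | nil => intro f e _; rfl
  | cons x xs ih =>
    intro f e hf
    by_cases hx : x = e
    · subst hx
      simp only [pvAltF, List.erase_cons_head]
      rw [if_pos (by simp; have := hf x; omega)]
      have h1 : Function.update (Function.update f x (f x + 1)) x
          (Function.update f x (f x + 1) x - 1) = f := by
        funext y
        by_cases hy : y = x
        · subst hy; simp [Function.update]
        · simp [Function.update, hy]
      rw [h1]
    · have hx' : ¬ (x == e) = true := by simpa using hx
      rw [List.erase_cons_tail hx']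
      simp only [pvAltF]
      rw [Function.update_of_ne hx]
      by_cases hpos : f x > 0
      · rw [if_pos hpos, if_pos hpos]
        have hcomm : Function.update (Function.update f e (f e + 1)) x (f x - 1)
            = Function.update (Function.update f x (f x - 1)) e
                (Function.update f x (f x - 1) e + 1) := by
          rw [Function.update_of_ne (fun h => hx h.symm), Function.update_comm hx]
        rw [hcomm, ih (Function.update f x (f x - 1)) e]
        intro y
        by_cases hy : y = x
        · subst hy; simp [Function.update]; omega
        · simp [Function.update, hy]; exact hf y
      · rw [if_neg hpos, if_neg hpos, ih f e hf]

-- the heart of the equivalence: budget-filter = folded first-occurrence erase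
theorem pvMain (bigram : List String) : ∀ (adjs : List String),
    pvAltF (fun y => (bigram.count y : Int)) adjs = bigram.foldl List.erase adjs := by
  induction bigram with
  | nil =>
    intro adjs
    simp only [List.count_nil, List.foldl_nil, Nat.cast_zero]
    exact pvAltF_of_nonpos adjs _ (fun _ => le_refl 0)
  | cons e rest ih =>
    intro adjs
    have hfun : (fun y => ((e :: rest).count y : Int))
        = Function.update (fun y => (rest.count y : Int)) e ((rest.count e : Int) + 1) := by
      funext y
      by_cases hy : y = e
      · subst hy; simp [Function.update]
      · simp [Function.update, hy, Ne.symm hy]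
    rw [hfun, List.foldl_cons,
        pvAltF_update_add_one adjs (fun y => (rest.count y : Int)) e (fun y => by positivity),
        ih (adjs.erase e)]

theorem pvA_eq_B (adjs bigram : List String) :
    bigram.foldl pvRemA adjs
      = pvAltGo (bigram.foldl (fun d e => d.insert e (d.getD e 0 + 1)) PySem.Dict.empty) adjs := by
  have h1 : bigram.foldl pvRemA adjs = bigram.foldl List.erase adjs := by
    exact PySem.List.foldl_congr_mem bigram pvRemA List.erase adjs
      (fun acc a _ => pvRemA_eq_erase acc a)
  rw [h1, pvAltGo_eq_altF, ← pvMain bigram adjs]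
  congr 1
  funext y
  rw [PySem.Dict.foldl_insert_getD_add_one_eq_counter, PySem.Dict.getD_counter]

-- ===== VERDICT (by name: the statement is the Claim_ definition above) =====
theorem get_adjectives_spec : Claim_equal_get_adjectives := by
  intro ndoc filtered _ _
  unfold Spec_get_adjectives get_adjectives get_adjectives_alt
  cases filtered
  · rfl
  · simp only [if_pos]
    exact pvA_eq_B _ _
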